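-- pv_equiv track=rewrite | github.com/whxtdxsa/baekjoon-algorithm | python/graph/simulation/16236.py | DinnerTime
-- ===== SOURCE A (Python) =====
-- from collections import deque
--
-- def initShark(N, Matrix):
--     for i in range(N):
--         for j in range(N):
--             if Matrix[i][j] == 9:
--                 Matrix[i][j] = 0
--                 return i, j, 2
--
-- def bfs(shark_x, shark_y, shark_size, N, Matrix):
--     visited = [[False] * N for _ in range(N)]
--     visited[shark_x][shark_y] = True
--     q = deque([(shark_x, shark_y, 0)])
--
--     dx = [-1, 0, 0, 1]
--     dy = [0, -1, 1, 0]
--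
--     res = []
--     while q:
--         x, y, t = q.popleft()
--         for i in range(4):
--             nx, ny = x + dx[i], y + dy[i]
--
--             # 상어 이동 조건
--             if 0 <= nx < N and 0 <= ny < N and not visited[nx][ny] and Matrix[nx][ny] <= shark_size:
--                 # 상어 먹이 조건
--                 if 0 < Matrix[nx][ny] < shark_size:
--                     res.append((nx, ny, t + 1))
--                 else:
--                     q.append((nx, ny, t + 1))
--                 visited[nx][ny] = True
--     if res:
--         res.sort(key=lambda x: (x[2], x[0], x[1]))
--         x, y, t = res[0]
--         Matrix[x][y] = 0
--         return (x, y, t)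
--     else: return None
--
-- def DinnerTime(N, Matrix):
--     shark_x, shark_y, shark_size = initShark(N, Matrix)
--     dinnerTime = 0
--     eat_times = 0
--     while True:
--         res = bfs(shark_x, shark_y, shark_size, N, Matrix)
--         if res == None: break
--         else:
--             shark_x, shark_y = res[0], res[1]
--             dinnerTime += res[2]
--             eat_times += 1
--             if eat_times == shark_size:
--                 shark_size += 1
--                 eat_times = 0
--
--     return dinnerTime
-- ===== SOURCE B (Python) =====
-- def initShark(N, Matrix):
--     for i in range(N):
--         for j in range(N):
--             if Matrix[i][j] == 9:
--                 Matrix[i][j] = 0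
--                 return i, j, 2
--
-- def nearestFish(sx, sy, size, N, Matrix):
--     # distance-layered search: no visited matrix, no queue, no sort --
--     # per layer collect the deduplicated newly reachable cells, stop at the
--     # first layer holding an eatable fish and take the min (row, col) there.
--     seen = [(sx, sy)]
--     frontier = [(sx, sy)]
--     t = 0
--     while frontier:
--         t += 1
--         cand = []
--         for x, y in frontier:
--             for nx, ny in ((x - 1, y), (x, y - 1), (x, y + 1), (x + 1, y)):
--                 if 0 <= nx < N and 0 <= ny < N and (nx, ny) not in seen \
--                         and (nx, ny) not in cand and Matrix[nx][ny] <= size: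
--                     cand.append((nx, ny))
--         targets = [(x, y) for x, y in cand if 0 < Matrix[x][y] < size]
--         if targets:
--             return min(targets) + (t,)
--         seen += cand
--         frontier = cand
--     return None
--
-- def DinnerTime(N, Matrix):
--     shark_x, shark_y, shark_size = initShark(N, Matrix)
--     total = 0
--     left = shark_size          # fish still to eat before the shark grows
--     while True:
--         res = nearestFish(shark_x, shark_y, shark_size, N, Matrix)
--         if res is None:
--             return total
--         shark_x, shark_y, t = res
--         Matrix[shark_x][shark_y] = 0
--         total += t
--         left -= 1
--         if left == 0:
--             shark_size += 1
--             left = shark_size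
-- ===== Notes on version B (the rewrite author's own statement) =====
-- stated objective: alternative
-- what changed: A runs a queue BFS with a visited boolean matrix over the whole reachable region, collects every eatable fish into a list and sorts it by (dist,row,col); B expands the grid distance layer by layer with a seen-list and a per-layer deduplicated candidate list (no visited matrix, no queue, no sort), stops at the first layer containing an eatable fish and takes its min (row,col), and the outer loop counts down fish-left-to-grow instead of counting eats up.
-- outside the precondition, e.g. on DinnerTime(3, [[9, 0, 0], [4, 4, 4], [4]]): A returns 0, B returns 0
import Mathlib
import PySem

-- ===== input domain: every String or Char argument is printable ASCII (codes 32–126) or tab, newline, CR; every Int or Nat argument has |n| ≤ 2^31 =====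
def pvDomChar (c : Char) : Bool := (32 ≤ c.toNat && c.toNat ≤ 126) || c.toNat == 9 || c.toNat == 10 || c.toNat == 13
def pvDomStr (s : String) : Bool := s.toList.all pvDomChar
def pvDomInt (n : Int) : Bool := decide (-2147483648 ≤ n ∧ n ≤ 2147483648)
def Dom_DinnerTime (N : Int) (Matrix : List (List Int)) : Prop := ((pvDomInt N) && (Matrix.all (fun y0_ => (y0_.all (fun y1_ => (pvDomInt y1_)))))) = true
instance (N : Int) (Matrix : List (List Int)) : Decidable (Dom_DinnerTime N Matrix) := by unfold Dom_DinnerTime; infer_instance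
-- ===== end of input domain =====

-- B replaces A's whole-region queue BFS (visited matrix, collect every fish, sort by (dist,row,col))
-- by a distance-layered search with a seen-list and per-layer candidate list that stops at the first
-- layer containing an eatable fish and takes its min (row,col); objective: alternative.
-- Both Pythons mutate Matrix identically (9 cleared, each eaten fish zeroed); the ports thread it functionally.

-- ===== PORT A =====

/-- `l[i]` with a default; exact for `0 ≤ i < len l` (every use is guarded so). -/
def getAt {α : Type} (d : α) : List α → Int → α
  | [], _ => d
  | a :: l, i => if i = 0 then a else getAt d l (i - 1)

/-- `l[i] = x`; exact for `0 ≤ i < len l` (every use is guarded so). -/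
def setAt {α : Type} : List α → Int → α → List α
  | [], _, _ => []
  | a :: l, i, x => if i = 0 then x :: l else a :: setAt l (i - 1) x

def mget (M : List (List Int)) (x y : Int) : Int := getAt 0 (getAt [] M x) y
def mset0 (M : List (List Int)) (x y : Int) : List (List Int) :=
  setAt M x (setAt (getAt [] M x) y 0)
def vget (v : List (List Bool)) (x y : Int) : Bool := getAt true (getAt [] v x) y
def vset (v : List (List Bool)) (x y : Int) : List (List Bool) :=
  setAt v x (setAt (getAt [] v x) y true)

def dirs : List (Int × Int) := [(-1, 0), (0, -1), (0, 1), (1, 0)]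

def countFalse (v : List (List Bool)) : Nat := (v.map (fun r => r.countP (fun b => !b))).sum

-- measure lemmas cited by the ports' `decreasing_by`

theorem countRow_setAt_lt (r : List Bool) (y : Int) (h : getAt true r y = false) :
    (setAt r y true).countP (fun b => !b) < r.countP (fun b => !b) := by
  induction r generalizing y with
  | nil => simp [getAt] at h
  | cons b r ih =>
    by_cases hy : y = 0
    · subst hy; simp [getAt] at h; subst h; simp [setAt]
    · simp only [getAt, hy, if_false] at h
      have := ih (y - 1) h
      simp [setAt, hy, List.countP_cons]; omega

theorem countFalse_vset_lt (v : List (List Bool)) (x y : Int) (h : vget v x y = false) :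
    countFalse (vset v x y) < countFalse v := by
  induction v generalizing x with
  | nil => simp [vget, getAt] at h
  | cons r v ih =>
    by_cases hx : x = 0
    · subst hx
      simp only [vget, getAt] at h
      simp [vset, setAt, countFalse, getAt]
      have := countRow_setAt_lt r y h
      omega
    · simp only [vget, getAt, hx, if_false] at h
      have := ih (x - 1) h
      simp only [vset, setAt, hx, if_false, countFalse, List.map_cons, List.sum_cons, getAt]
      simp only [vset, countFalse] at this
      omega

theorem foldl_measure_le {σ α : Type} (meas : σ → Nat) (f : σ → α → σ) (l : List α) (s : σ)
    (h : ∀ s d, meas (f s d) ≤ meas s) : meas (l.foldl f s) ≤ meas s := by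
  induction l generalizing s with
  | nil => simp
  | cons d l ih => exact le_trans (ih (f s d)) (h s d)

/-- one neighbour of A's bfs inner loop: state = (visited, queue, res). -/
def stepA (size N : Int) (M : List (List Int)) (x y t : Int)
    (st : List (List Bool) × List (Int × Int × Int) × List (Int × Int × Int)) (d : Int × Int) :
    List (List Bool) × List (Int × Int × Int) × List (Int × Int × Int) :=
  if 0 ≤ x + d.1 ∧ x + d.1 < N ∧ 0 ≤ y + d.2 ∧ y + d.2 < N ∧
      vget st.1 (x + d.1) (y + d.2) = false ∧ mget M (x + d.1) (y + d.2) ≤ size then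
    if 0 < mget M (x + d.1) (y + d.2) ∧ mget M (x + d.1) (y + d.2) < size then
      (vset st.1 (x + d.1) (y + d.2), st.2.1, st.2.2 ++ [(x + d.1, y + d.2, t + 1)])
    else
      (vset st.1 (x + d.1) (y + d.2), st.2.1 ++ [(x + d.1, y + d.2, t + 1)], st.2.2)
  else st

theorem stepA_meas (size N : Int) (M : List (List Int)) (x y t : Int) (st) (d) :
    (stepA size N M x y t st d).2.1.length + countFalse (stepA size N M x y t st d).1 ≤
      st.2.1.length + countFalse st.1 := by
  unfold stepA
  split_ifs with h1 h2
  · have := countFalse_vset_lt st.1 (x + d.1) (y + d.2) h1.2.2.2.2.1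
    simp; omega
  · have := countFalse_vset_lt st.1 (x + d.1) (y + d.2) h1.2.2.2.2.1
    simp; omega
  · exact le_rfl

/-- A's `while q:` loop. -/
def bfsLoopA (size N : Int) (M : List (List Int)) :
    List (List Bool) → List (Int × Int × Int) → List (Int × Int × Int) → List (Int × Int × Int)
  | _, [], res => res
  | v, (x, y, t) :: q, res =>
    bfsLoopA size N M
      (dirs.foldl (stepA size N M x y t) (v, q, res)).1
      (dirs.foldl (stepA size N M x y t) (v, q, res)).2.1
      (dirs.foldl (stepA size N M x y t) (v, q, res)).2.2
termination_by v q _ => q.length + countFalse v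
decreasing_by
  have h := foldl_measure_le (fun st => st.2.1.length + countFalse st.1)
    (stepA size N M x y t) dirs (v, q, res) (fun s d => stepA_meas size N M x y t s d)
  simp only at h ⊢
  simp [List.length_cons]; omega

def keyA (e : Int × Int × Int) : Lex (Int × Lex (Int × Int)) := toLex (e.2.2, toLex (e.1, e.2.1))

/-- A's bfs: returns (found fish with its distance, updated Matrix). -/
def bfsA (sx sy size N : Int) (M : List (List Int)) :
    Option (Int × Int × Int) × List (List Int) :=
  let v := vset (List.replicate N.toNat (List.replicate N.toNat false)) sx sy
  let res := bfsLoopA size N M v [(sx, sy, 0)] []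
  match res with
  | [] => (none, M)
  | _ :: _ =>
    match PySem.List.sorted res keyA with
    | [] => (none, M)
    | e :: _ => (some e, mset0 M e.1 e.2.1)

-- initShark (identical in Source A and Source B; the constant size 2 is applied by the callers)
def initJ (M : List (List Int)) (i : Int) : List Int → Option Int
  | [] => none
  | j :: js => if mget M i j = 9 then some j else initJ M i js

def initI (M : List (List Int)) (js : List Int) : List Int → Option (Int × Int)
  | [] => none
  | i :: is' =>
    match initJ M i js with
    | some j => some (i, j)
    | none => initI M js is'

def initShark (N : Int) (M : List (List Int)) : Option (Int × Int) × List (List Int) :=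
  match initI M (PySem.List.pyRange 0 N 1) (PySem.List.pyRange 0 N 1) with
  | some (i, j) => (some (i, j), mset0 M i j)
  | none => (none, M)

def fuelOf (M : List (List Int)) : Nat := (M.map List.length).sum + 2

/-- A's `while True:` outer loop (fuel is a totality guard only; `fuelOf` always suffices). -/
def loopA (fuel : Nat) (x y size eaten acc N : Int) (M : List (List Int)) : Int :=
  match fuel with
  | 0 => acc
  | f + 1 =>
    match bfsA x y size N M with
    | (none, _) => acc
    | (some (nx, ny, t), M') =>
      if eaten + 1 = size then loopA f nx ny (size + 1) 0 (acc + t) N M'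
      else loopA f nx ny size (eaten + 1) (acc + t) N M'

def DinnerTime (N : Int) (Matrix : List (List Int)) : Int :=
  match initShark N Matrix with
  | (none, _) => 0   -- Python raises here (no shark); excluded by Pre_
  | (some (i, j), M') => loopA (fuelOf Matrix) i j 2 0 0 N M'

-- ===== PORT B =====

def nbrs (x y : Int) : List (Int × Int) := [(x - 1, y), (x, y - 1), (x, y + 1), (x + 1, y)]

/-- `0 < Matrix[c] < size` (the list-comprehension filter of Source B). -/
def isEat (size : Int) (M : List (List Int)) (c : Int × Int) : Bool :=
  decide (0 < mget M c.1 c.2 ∧ mget M c.1 c.2 < size)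

/-- one neighbour of Source B's layer scan: append to `cand` when new and enterable. -/
def nbStep (size N : Int) (M : List (List Int)) (seen : List (Int × Int))
    (cand : List (Int × Int)) (n : Int × Int) : List (Int × Int) :=
  if 0 ≤ n.1 ∧ n.1 < N ∧ 0 ≤ n.2 ∧ n.2 < N ∧ seen.contains n = false ∧
      cand.contains n = false ∧ mget M n.1 n.2 ≤ size then
    cand ++ [n]
  else cand

def cellStep (size N : Int) (M : List (List Int)) (seen : List (Int × Int))
    (cand : List (Int × Int)) (c : Int × Int) : List (Int × Int) :=
  (nbrs c.1 c.2).foldl (nbStep size N M seen) cand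

/-- the `cand` collected from one whole frontier. -/
def layerOf (size N : Int) (M : List (List Int)) (seen frontier : List (Int × Int)) :
    List (Int × Int) :=
  frontier.foldl (cellStep size N M seen) []

-- termination measure for the layered loop: window cells not yet seen

theorem contains_append_pair (s t : List (Int × Int)) (a : Int × Int) :
    (s ++ t).contains a = (s.contains a || t.contains a) := by
  by_cases h1 : a ∈ s <;> by_cases h2 : a ∈ t <;> simp [h1, h2]

def winPairs (N : Int) : List (Int × Int) :=
  ((List.range N.toNat).product (List.range N.toNat)).map (fun p => ((p.1 : Int), (p.2 : Int)))

theorem mem_winPairs (N a b : Int) (h1 : 0 ≤ a) (h2 : a < N) (h3 : 0 ≤ b) (h4 : b < N) :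
    (a, b) ∈ winPairs N := by
  have hab : ((a.toNat : Int), (b.toNat : Int)) = (a, b) := by
    rw [Int.toNat_of_nonneg h1, Int.toNat_of_nonneg h3]
  rw [← hab]
  unfold winPairs
  refine List.mem_map.mpr ⟨(a.toNat, b.toNat), List.mem_product.mpr ⟨?_, ?_⟩, rfl⟩ <;>
    exact List.mem_range.mpr (by omega)

theorem len_filter_mono {α : Type} (l : List α) (p q : α → Bool) (h : ∀ a, p a = true → q a = true) :
    (l.filter p).length ≤ (l.filter q).length := by
  induction l with
  | nil => simp
  | cons a l ih =>
    simp only [List.filter_cons]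
    by_cases hp : p a = true
    · rw [hp, h a hp]; simpa using ih
    · have hp' : p a = false := by simpa using hp
      rw [hp']
      by_cases hq : q a = true
      · rw [hq]; simp only [if_false, if_true, List.length_cons, Bool.false_eq_true]; omega
      · have hq' : q a = false := by simpa using hq
        rw [hq']; simpa using ih

theorem len_filter_sub (l s extra : List (Int × Int)) :
    (l.filter (fun c => !((s ++ extra).contains c))).length ≤
      (l.filter (fun c => !(s.contains c))).length := by
  apply len_filter_mono
  intro a ha
  rw [contains_append_pair] at ha
  cases hx : s.contains a
  · rfl
  · rw [hx] at ha; simp at ha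

theorem fresh_append_one_aux (s : List (Int × Int)) (x : Int × Int)
    (hs : s.contains x = false) :
    ∀ l : List (Int × Int), x ∈ l →
      (l.filter (fun c => !((s ++ [x]).contains c))).length + 1 ≤
        (l.filter (fun c => !(s.contains c))).length := by
  intro l hx
  induction l with
  | nil => simp at hx
  | cons a l ih =>
    by_cases hax : a = x
    · subst hax
      have h1 : (s ++ [a]).contains a = true := by
        rw [contains_append_pair]; simp
      simp only [List.filter_cons, h1, hs, Bool.not_true, Bool.not_false, if_false, if_true,
        Bool.false_eq_true, List.length_cons]
      have := len_filter_sub l s [a]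
      omega
    · have hx' : x ∈ l := by
        rcases List.mem_cons.mp hx with h | h
        · exact absurd h.symm hax
        · exact h
      have h1 : (s ++ [x]).contains a = s.contains a := by
        rw [contains_append_pair]
        have hsx : [x].contains a = false := by simp; exact fun h => hax h
        rw [hsx, Bool.or_false]
      simp only [List.filter_cons, h1]
      cases hs2 : s.contains a
      · simp only [Bool.not_false, if_true, List.length_cons]
        have := ih hx'; omega
      · simp only [Bool.not_true, if_false, Bool.false_eq_true]
        exact ih hx'

def freshCount (N : Int) (seen : List (Int × Int)) : Nat :=
  ((winPairs N).filter (fun c => !(seen.contains c))).length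

theorem fresh_append_one (N : Int) (s : List (Int × Int)) (x : Int × Int)
    (hx : x ∈ winPairs N) (hs : s.contains x = false) :
    freshCount N (s ++ [x]) + 1 ≤ freshCount N s :=
  fresh_append_one_aux s x hs (winPairs N) hx

theorem fresh_nbStep (size N : Int) (M : List (List Int)) (seen cand : List (Int × Int))
    (n : Int × Int) :
    freshCount N (seen ++ nbStep size N M seen cand n) + (nbStep size N M seen cand n).length ≤
      freshCount N (seen ++ cand) + cand.length := by
  unfold nbStep
  split_ifs with h
  · obtain ⟨h1, h2, h3, h4, h5, h6, _⟩ := h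
    have hw : n ∈ winPairs N := by
      have := mem_winPairs N n.1 n.2 h1 h2 h3 h4; simpa using this
    have hc : (seen ++ cand).contains n = false := by
      rw [contains_append_pair, h5, h6]; rfl
    have := fresh_append_one N (seen ++ cand) n hw hc
    simp only [← List.append_assoc]
    simp at *; omega
  · exact le_rfl

theorem fresh_layer (size N : Int) (M : List (List Int)) (seen frontier : List (Int × Int)) :
    freshCount N (seen ++ layerOf size N M seen frontier) +
        (layerOf size N M seen frontier).length ≤ freshCount N seen := by
  have h := foldl_measure_le (fun cand => freshCount N (seen ++ cand) + cand.length)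
    (cellStep size N M seen) frontier []
    (fun cand c => foldl_measure_le (fun cand => freshCount N (seen ++ cand) + cand.length)
      (nbStep size N M seen) (nbrs c.1 c.2) cand
      (fun cand n => fresh_nbStep size N M seen cand n))
  simpa [layerOf] using h

/-- Source B's `while frontier:` loop, one distance layer per iteration. -/
def searchB (size N : Int) (M : List (List Int)) :
    List (Int × Int) → List (Int × Int) → Int → Option (Int × Int × Int)
  | _, [], _ => none
  | seen, c :: fr, t =>
    match PySem.List.min? ((layerOf size N M seen (c :: fr)).filter (isEat size M))
        (fun p => toLex p) with
    | some p => some (p.1, p.2, t + 1)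
    | none =>
      searchB size N M (seen ++ layerOf size N M seen (c :: fr))
        (layerOf size N M seen (c :: fr)) (t + 1)
termination_by seen f _ => 2 * freshCount N seen + f.length
decreasing_by
  have h := fresh_layer size N M seen (c :: fr)
  simp [List.length_cons] at *; omega

def nearestFishB (sx sy size N : Int) (M : List (List Int)) : Option (Int × Int × Int) :=
  searchB size N M [(sx, sy)] [(sx, sy)] 0

/-- Source B's `while True:` outer loop, counting down `left` (fuel is a totality guard only). -/
def loopB (fuel : Nat) (x y size left acc N : Int) (M : List (List Int)) : Int :=
  match fuel with
  | 0 => acc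
  | f + 1 =>
    match nearestFishB x y size N M with
    | none => acc
    | some (nx, ny, t) =>
      if left - 1 = 0 then loopB f nx ny (size + 1) (size + 1) (acc + t) N (mset0 M nx ny)
      else loopB f nx ny size (left - 1) (acc + t) N (mset0 M nx ny)

def DinnerTime_alt (N : Int) (Matrix : List (List Int)) : Int :=
  match initShark N Matrix with
  | (none, _) => 0   -- Python raises here (no shark); excluded by Pre_
  | (some (i, j), M') => loopB (fuelOf Matrix) i j 2 2 0 N M'

-- ===== PRECONDITION & SPEC =====

-- Pre_ excludes inputs where A raises: the row-major scan must find a 9 without hitting a missing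
-- window cell (else TypeError/IndexError), and afterwards either the whole N×N window is present or
-- every in-window neighbour of the shark exists with value > 2 (the BFS then reads no other cell).
-- This excludes some ragged matrices whose short rows A's BFS never happens to reach (A and B both
-- return the same value there).
def Pre_DinnerTime (N : Int) (Matrix : List (List Int)) : Prop :=
  ∃ i ∈ List.range (min N.toNat Matrix.length),
    ∃ j ∈ List.range (min N.toNat (Matrix.getD i []).length),
      (Matrix.getD i []).getD j 0 = 9 ∧
      (∀ j' ∈ List.range j, (Matrix.getD i []).getD j' 0 ≠ 9) ∧
      (∀ i' ∈ List.range i,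
        N.toNat ≤ (Matrix.getD i' []).length ∧ 9 ∉ (Matrix.getD i' []).take N.toNat) ∧
      ((N.toNat ≤ Matrix.length ∧ ∀ r ∈ Matrix.take N.toNat, N.toNat ≤ r.length) ∨
        (∀ d ∈ dirs,
          (0 ≤ (i : Int) + d.1 ∧ (i : Int) + d.1 < N ∧ 0 ≤ (j : Int) + d.2 ∧ (j : Int) + d.2 < N) →
            (((i : Int) + d.1).toNat < Matrix.length ∧
              ((j : Int) + d.2).toNat < (Matrix.getD ((i : Int) + d.1).toNat []).length ∧
              2 < (Matrix.getD ((i : Int) + d.1).toNat []).getD ((j : Int) + d.2).toNat 0)))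

instance (N : Int) (Matrix : List (List Int)) : Decidable (Pre_DinnerTime N Matrix) := by
  unfold Pre_DinnerTime; infer_instance

def pvWitness_DinnerTime : Int × List (List Int) := (2, [[9, 0], [0, 3]])

def Spec_DinnerTime (N : Int) (Matrix : List (List Int)) (out : Int) : Prop := out = DinnerTime_alt N Matrix
instance (N : Int) (Matrix : List (List Int)) (out : Int) : Decidable (Spec_DinnerTime N Matrix out) := by unfold Spec_DinnerTime; infer_instance

-- ===== CLAIM (what is proved, stated in full; the proofs are below) =====
def Claim_equal_DinnerTime : Prop := ∀ (N : Int) (Matrix : List (List Int)), Dom_DinnerTime N Matrix → Pre_DinnerTime N Matrix → Spec_DinnerTime N Matrix (DinnerTime N Matrix)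

-- ===== LEMMAS AND PROOFS =====

def tagT (t : Int) (p : Int × Int) : Int × Int × Int := (p.1, p.2, t)

/-- A's visited matrix as a function of the list of discovered cells. -/
def visOf (N : Int) (seen : List (Int × Int)) : List (List Bool) :=
  seen.foldl (fun v c => vset v c.1 c.2)
    (List.replicate N.toNat (List.replicate N.toNat false))

theorem visOf_snoc (N : Int) (s : List (Int × Int)) (a b : Int) :
    vset (visOf N s) a b = visOf N (s ++ [(a, b)]) := by
  simp [visOf, List.foldl_append]

theorem getAt_replicate {α : Type} (d a : α) (n : Nat) (i : Int) :
    getAt d (List.replicate n a) i = if 0 ≤ i ∧ i < (n : Int) then a else d := by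
  induction n generalizing i with
  | zero => simp [getAt]
  | succ n ih =>
    rw [List.replicate_succ]
    by_cases h0 : i = 0
    · subst h0; simp [getAt]
    · simp only [getAt, h0, if_false, ih]
      have : (0 ≤ i - 1 ∧ i - 1 < (n : Int)) ↔ (0 ≤ i ∧ i < ((n + 1 : Nat) : Int)) := by
        push_cast; omega
      rw [if_congr this rfl rfl]

theorem length_setAt {α : Type} (l : List α) (i : Int) (x : α) :
    (setAt l i x).length = l.length := by
  induction l generalizing i with
  | nil => rfl
  | cons a l ih =>
    by_cases h0 : i = 0 <;> simp [setAt, h0, ih]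

theorem getAt_setAt {α : Type} (d : α) (l : List α) (i j : Int) (x : α) :
    getAt d (setAt l i x) j =
      if j = i ∧ 0 ≤ i ∧ i < (l.length : Int) then x else getAt d l j := by
  induction l generalizing i j with
  | nil => simp [setAt, getAt]
  | cons a l ih =>
    by_cases hi : i = 0
    · subst hi
      by_cases hj : j = 0
      · subst hj; simp [setAt, getAt]
      · simp [setAt, getAt, hj]
    · by_cases hj : j = 0
      · subst hj
        simp [setAt, getAt, hi, Ne.symm hi]
      · simp only [setAt, hi, if_false, getAt, hj, ih]
        have : (j - 1 = i - 1 ∧ 0 ≤ i - 1 ∧ i - 1 < (l.length : Int)) ↔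
            (j = i ∧ 0 ≤ i ∧ i < ((a :: l).length : Int)) := by
          simp only [List.length_cons]; push_cast; omega
        rw [if_congr this rfl rfl]

theorem setAt_out {α : Type} (l : List α) (i : Int) (x : α)
    (h : ¬ (0 ≤ i ∧ i < (l.length : Int))) : setAt l i x = l := by
  induction l generalizing i with
  | nil => rfl
  | cons a l ih =>
    by_cases h0 : i = 0
    · exact absurd (by subst h0; constructor <;> simp) h
    · simp only [setAt, h0, if_false]
      rw [ih (i - 1) (by simp only [List.length_cons] at h; push_cast at h ⊢; omega)]

theorem getAt_mem {α : Type} (d : α) (l : List α) (i : Int)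
    (h : 0 ≤ i ∧ i < (l.length : Int)) : getAt d l i ∈ l := by
  induction l generalizing i with
  | nil => simp at h; omega
  | cons a l ih =>
    by_cases h0 : i = 0
    · simp [getAt, h0]
    · simp only [getAt, h0, if_false]
      exact List.mem_cons_of_mem a (ih (i - 1) (by simp only [List.length_cons] at h; push_cast at h ⊢; omega))

theorem setAt_mem {α : Type} (l : List α) (i : Int) (x : α) :
    ∀ r ∈ setAt l i x, r = x ∨ r ∈ l := by
  induction l generalizing i with
  | nil => simp [setAt]
  | cons a l ih =>
    intro r hr
    by_cases h0 : i = 0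
    · rw [setAt, if_pos h0] at hr
      rcases List.mem_cons.mp hr with h | h
      · exact Or.inl h
      · exact Or.inr (List.mem_cons_of_mem a h)
    · rw [setAt, if_neg h0] at hr
      rcases List.mem_cons.mp hr with h | h
      · exact Or.inr (by simp [h])
      · rcases ih (i - 1) r h with h | h
        · exact Or.inl h
        · exact Or.inr (List.mem_cons_of_mem a h)

def VShaped (N : Int) (v : List (List Bool)) : Prop :=
  v.length = N.toNat ∧ ∀ r ∈ v, r.length = N.toNat

theorem vshaped_base (N : Int) :
    VShaped N (List.replicate N.toNat (List.replicate N.toNat false)) := by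
  constructor
  · simp
  · intro r hr; rw [List.eq_of_mem_replicate hr]; simp

theorem vshaped_vset (N : Int) (v : List (List Bool)) (a b : Int) (hv : VShaped N v) :
    VShaped N (vset v a b) := by
  obtain ⟨h1, h2⟩ := hv
  by_cases ha : 0 ≤ a ∧ a < (v.length : Int)
  · refine ⟨by rw [vset, length_setAt, h1], ?_⟩
    intro r hr
    rcases setAt_mem v a _ r hr with h | h
    · rw [h, length_setAt]
      exact h2 _ (getAt_mem [] v a ha)
    · exact h2 r h
  · rw [vset, setAt_out v a _ ha]
    exact ⟨h1, h2⟩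

theorem vget_base (N x y : Int) (hx1 : 0 ≤ x) (hx2 : x < N) (hy1 : 0 ≤ y) (hy2 : y < N) :
    vget (List.replicate N.toNat (List.replicate N.toNat false)) x y = false := by
  rw [vget, getAt_replicate, if_pos (by omega), getAt_replicate, if_pos (by omega)]

theorem vget_vset (N : Int) (v : List (List Bool)) (a b x y : Int) (hv : VShaped N v)
    (hx1 : 0 ≤ x) (hx2 : x < N) (hy1 : 0 ≤ y) (hy2 : y < N) :
    vget (vset v a b) x y = if (x, y) = (a, b) then true else vget v x y := by
  obtain ⟨h1, h2⟩ := hv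
  rw [vget, vset, getAt_setAt]
  by_cases hxa : x = a ∧ 0 ≤ a ∧ a < (v.length : Int)
  · rw [if_pos hxa]
    obtain ⟨hxa', hxa2⟩ := hxa
    have hrow : (getAt [] v a).length = N.toNat := h2 _ (getAt_mem [] v a hxa2)
    rw [getAt_setAt]
    by_cases hyb : y = b ∧ 0 ≤ b ∧ b < ((getAt [] v a).length : Int)
    · rw [if_pos hyb, if_pos (by rw [Prod.ext_iff]; exact ⟨hxa', hyb.1⟩)]
    · have hne : ¬ ((x, y) = (a, b)) := by
        rw [Prod.ext_iff]
        rintro ⟨rfl, rfl⟩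
        exact hyb ⟨rfl, by omega, by rw [hrow]; omega⟩
      rw [if_neg hyb, if_neg hne, vget, hxa']
  · have hne : ¬ ((x, y) = (a, b)) := by
      rw [Prod.ext_iff]
      rintro ⟨rfl, rfl⟩
      exact hxa ⟨rfl, by omega, by rw [h1]; omega⟩
    rw [if_neg hxa, if_neg hne, vget]

theorem vis_get_aux (N : Int) (s : List (Int × Int)) (v : List (List Bool)) (x y : Int)
    (hv : VShaped N v) (hx1 : 0 ≤ x) (hx2 : x < N) (hy1 : 0 ≤ y) (hy2 : y < N) :
    vget (s.foldl (fun v c => vset v c.1 c.2) v) x y = (s.contains (x, y) || vget v x y) := by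
  induction s generalizing v with
  | nil => simp
  | cons c s ih =>
    rw [List.foldl_cons, ih _ (vshaped_vset N v c.1 c.2 hv),
      vget_vset N v c.1 c.2 x y hv hx1 hx2 hy1 hy2]
    by_cases hc : (x, y) = c
    · simp [hc]
    · have : ((x, y) == c) = false := by simpa using hc
      simp [hc]

theorem vis_get (N : Int) (seen : List (Int × Int)) (x y : Int)
    (hx1 : 0 ≤ x) (hx2 : x < N) (hy1 : 0 ≤ y) (hy2 : y < N) :
    vget (visOf N seen) x y = seen.contains (x, y) := by
  rw [visOf, vis_get_aux N seen _ x y (vshaped_base N) hx1 hx2 hy1 hy2,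
    vget_base N x y hx1 hx2 hy1 hy2, Bool.or_false]

theorem nb_fold (size N : Int) (M : List (List Int)) (x y t : Int) :
    ∀ (ds : List (Int × Int)) (S cand : List (Int × Int)) (q res : List (Int × Int × Int)),
      ∃ δ : List (Int × Int),
        (ds.map (fun d => (x + d.1, y + d.2))).foldl (nbStep size N M S) cand = cand ++ δ ∧
        ds.foldl (stepA size N M x y t) (visOf N (S ++ cand), q, res)
          = (visOf N (S ++ (cand ++ δ)),
             q ++ (δ.filter (fun c => !(isEat size M c))).map (tagT (t + 1)),
             res ++ (δ.filter (isEat size M)).map (tagT (t + 1))) := by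
  intro ds
  induction ds with
  | nil => intro S cand q res; exact ⟨[], by simp, by simp⟩
  | cons d ds ih =>
    intro S cand q res
    by_cases hg : 0 ≤ x + d.1 ∧ x + d.1 < N ∧ 0 ≤ y + d.2 ∧ y + d.2 < N ∧
        S.contains (x + d.1, y + d.2) = false ∧ cand.contains (x + d.1, y + d.2) = false ∧
        mget M (x + d.1) (y + d.2) ≤ size
    · obtain ⟨h1, h2, h3, h4, h5, h6, h7⟩ := hg
      have hvg : vget (visOf N (S ++ cand)) (x + d.1) (y + d.2) = false := by
        rw [vis_get N (S ++ cand) _ _ h1 h2 h3 h4, contains_append_pair, h5, h6]; rfl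
      have hga : 0 ≤ x + d.1 ∧ x + d.1 < N ∧ 0 ≤ y + d.2 ∧ y + d.2 < N ∧
          vget (visOf N (S ++ cand)) (x + d.1) (y + d.2) = false ∧
          mget M (x + d.1) (y + d.2) ≤ size := ⟨h1, h2, h3, h4, hvg, h7⟩
      have hnb : nbStep size N M S cand (x + d.1, y + d.2) = cand ++ [(x + d.1, y + d.2)] := by
        rw [nbStep, if_pos ⟨h1, h2, h3, h4, h5, h6, h7⟩]
      by_cases he : 0 < mget M (x + d.1) (y + d.2) ∧ mget M (x + d.1) (y + d.2) < size
      · have heat : isEat size M (x + d.1, y + d.2) = true := decide_eq_true he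
        have hstep : stepA size N M x y t (visOf N (S ++ cand), q, res) d =
            (visOf N (S ++ (cand ++ [(x + d.1, y + d.2)])), q,
             res ++ [(x + d.1, y + d.2, t + 1)]) := by
          rw [stepA, if_pos hga, if_pos he, visOf_snoc]
          rw [← List.append_assoc]
        obtain ⟨δ, hf, hs⟩ :=
          ih S (cand ++ [(x + d.1, y + d.2)]) q (res ++ [(x + d.1, y + d.2, t + 1)])
        refine ⟨(x + d.1, y + d.2) :: δ, ?_, ?_⟩
        · rw [List.map_cons, List.foldl_cons, hnb, hf]
          simp
        · rw [List.foldl_cons, hstep, hs]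
          simp [heat, tagT]
      · have heat : isEat size M (x + d.1, y + d.2) = false := decide_eq_false he
        have hstep : stepA size N M x y t (visOf N (S ++ cand), q, res) d =
            (visOf N (S ++ (cand ++ [(x + d.1, y + d.2)])),
             q ++ [(x + d.1, y + d.2, t + 1)], res) := by
          rw [stepA, if_pos hga, if_neg he, visOf_snoc]
          rw [← List.append_assoc]
        obtain ⟨δ, hf, hs⟩ :=
          ih S (cand ++ [(x + d.1, y + d.2)]) (q ++ [(x + d.1, y + d.2, t + 1)]) res
        refine ⟨(x + d.1, y + d.2) :: δ, ?_, ?_⟩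
        · rw [List.map_cons, List.foldl_cons, hnb, hf]
          simp
        · rw [List.foldl_cons, hstep, hs]
          simp [heat, tagT]
    · have hnb : nbStep size N M S cand (x + d.1, y + d.2) = cand := by
        rw [nbStep, if_neg hg]
      have hga : ¬ (0 ≤ x + d.1 ∧ x + d.1 < N ∧ 0 ≤ y + d.2 ∧ y + d.2 < N ∧
          vget (visOf N (S ++ cand)) (x + d.1) (y + d.2) = false ∧
          mget M (x + d.1) (y + d.2) ≤ size) := by
        intro hh
        obtain ⟨h1, h2, h3, h4, h5, h6⟩ := hh
        rw [vis_get N (S ++ cand) _ _ h1 h2 h3 h4, contains_append_pair] at h5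
        obtain ⟨hc1, hc2⟩ := Bool.or_eq_false_iff.mp h5
        exact hg ⟨h1, h2, h3, h4, hc1, hc2, h6⟩
      have hstep : stepA size N M x y t (visOf N (S ++ cand), q, res) d =
          (visOf N (S ++ cand), q, res) := by
        rw [stepA, if_neg hga]
      obtain ⟨δ, hf, hs⟩ := ih S cand q res
      exact ⟨δ, by rw [List.map_cons, List.foldl_cons, hnb, hf], by
        rw [List.foldl_cons, hstep, hs]⟩

theorem dirs_map (x y : Int) : dirs.map (fun d => (x + d.1, y + d.2)) = nbrs x y := by
  simp [dirs, nbrs, Prod.ext_iff]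
  omega

theorem layer_corr (size N : Int) (M : List (List Int)) (t : Int) :
    ∀ (cur : List (Int × Int)) (S cand : List (Int × Int)) (res : List (Int × Int × Int)),
      bfsLoopA size N M (visOf N (S ++ cand))
          (cur.map (tagT t) ++ (cand.filter (fun c => !(isEat size M c))).map (tagT (t + 1)))
          (res ++ (cand.filter (isEat size M)).map (tagT (t + 1)))
        = bfsLoopA size N M (visOf N (S ++ cur.foldl (cellStep size N M S) cand))
            (((cur.foldl (cellStep size N M S) cand).filter
                (fun c => !(isEat size M c))).map (tagT (t + 1)))
            (res ++ ((cur.foldl (cellStep size N M S) cand).filter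
                (isEat size M)).map (tagT (t + 1))) := by
  intro cur
  induction cur with
  | nil => intro S cand res; simp
  | cons c cur ih =>
    intro S cand res
    obtain ⟨δ, hf, hs⟩ := nb_fold size N M c.1 c.2 t dirs S cand
      (cur.map (tagT t) ++ (cand.filter (fun c => !(isEat size M c))).map (tagT (t + 1)))
      (res ++ (cand.filter (isEat size M)).map (tagT (t + 1)))
    have hq : (c :: cur).map (tagT t) ++
        (cand.filter (fun c => !(isEat size M c))).map (tagT (t + 1))
        = (c.1, c.2, t) :: (cur.map (tagT t) ++
            (cand.filter (fun c => !(isEat size M c))).map (tagT (t + 1))) := by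
      simp [tagT]
    have hcs : cellStep size N M S cand c = cand ++ δ := by
      rw [cellStep, ← dirs_map c.1 c.2, hf]
    rw [hq, bfsLoopA, hs]
    have e1 : (cur.map (tagT t) ++
          (cand.filter (fun c => !(isEat size M c))).map (tagT (t + 1))) ++
        (δ.filter (fun c => !(isEat size M c))).map (tagT (t + 1))
        = cur.map (tagT t) ++
          (((cand ++ δ).filter (fun c => !(isEat size M c))).map (tagT (t + 1))) := by
      simp [List.filter_append]
    have e2 : (res ++ (cand.filter (isEat size M)).map (tagT (t + 1))) ++
        (δ.filter (isEat size M)).map (tagT (t + 1))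
        = res ++ (((cand ++ δ).filter (isEat size M)).map (tagT (t + 1))) := by
      simp [List.filter_append]
    simp only
    rw [e1, e2, ih S (cand ++ δ) res, List.foldl_cons, hcs]

/-- ghost: the full layer-by-layer expansion (all fish A would ever collect, tagged). -/
def layersA (size N : Int) (M : List (List Int)) :
    List (Int × Int) → List (Int × Int) → Int → List (Int × Int × Int)
  | _, [], _ => []
  | seen, c :: fr, t =>
    ((layerOf size N M seen (c :: fr)).filter (isEat size M)).map (tagT (t + 1)) ++
      layersA size N M (seen ++ layerOf size N M seen (c :: fr))
        ((layerOf size N M seen (c :: fr)).filter (fun c => !(isEat size M c))) (t + 1)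
termination_by seen f _ => 2 * freshCount N seen + f.length
decreasing_by
  have h := fresh_layer size N M seen (c :: fr)
  have h2 : ((layerOf size N M seen (c :: fr)).filter (fun c => !(isEat size M c))).length ≤
      (layerOf size N M seen (c :: fr)).length := List.length_filter_le _ _
  simp [List.length_cons] at *; omega

theorem loopA_eq_layers (size N : Int) (M : List (List Int)) :
    ∀ (seen frontier : List (Int × Int)) (t : Int) (res : List (Int × Int × Int)),
      bfsLoopA size N M (visOf N seen) (frontier.map (tagT t)) res
        = res ++ layersA size N M seen frontier t := by
  intro seen frontier t
  induction seen, frontier, t using layersA.induct size N M with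
  | case1 seen t => intro res; simp [bfsLoopA, layersA]
  | case2 seen c fr t ih =>
    intro res
    have h := layer_corr size N M t (c :: fr) seen [] res
    simp only [List.append_nil, List.filter_nil, List.map_nil] at h
    rw [h]
    have hL : (c :: fr).foldl (cellStep size N M seen) [] = layerOf size N M seen (c :: fr) := rfl
    rw [hL, ih, layersA]
    simp

theorem layers_time (size N : Int) (M : List (List Int)) :
    ∀ (seen f : List (Int × Int)) (t : Int) (e : Int × Int × Int),
      e ∈ layersA size N M seen f t → t < e.2.2 := by
  intro seen f t
  induction seen, f, t using layersA.induct size N M with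
  | case1 seen t => intro e he; simp [layersA] at he
  | case2 seen c fr t ih =>
    intro e he
    rw [layersA] at he
    rcases List.mem_append.mp he with h | h
    · obtain ⟨p, _, rfl⟩ := List.mem_map.mp h
      simp [tagT]
    · have := ih e h; omega

theorem filter_not_of_filter_nil {α : Type} (l : List α) (p : α → Bool)
    (h : l.filter p = []) : l.filter (fun a => !(p a)) = l := by
  have hmem := List.filter_eq_nil_iff.mp h
  apply List.filter_eq_self.mpr
  intro a ha
  simp [hmem a ha]

theorem searchB_none (size N : Int) (M : List (List Int)) :
    ∀ (seen f : List (Int × Int)) (t : Int),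
      searchB size N M seen f t = none → layersA size N M seen f t = [] := by
  intro seen f t
  induction seen, f, t using searchB.induct size N M with
  | case1 seen t => intro _; simp [layersA]
  | case2 seen c fr t p hp => intro h; rw [searchB, hp] at h; exact absurd h (by simp)
  | case3 seen c fr t hp ih =>
    intro h
    rw [searchB, hp] at h
    have hnil : (layerOf size N M seen (c :: fr)).filter (isEat size M) = [] :=
      (PySem.List.min?_eq_none_iff _ _).mp hp
    have hall := filter_not_of_filter_nil _ _ hnil
    rw [layersA, hnil, hall, ih h]
    simp

theorem searchB_some (size N : Int) (M : List (List Int)) :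
    ∀ (seen f : List (Int × Int)) (t x y dd : Int),
      searchB size N M seen f t = some (x, y, dd) →
        (x, y, dd) ∈ layersA size N M seen f t ∧
          ∀ e ∈ layersA size N M seen f t, keyA (x, y, dd) ≤ keyA e := by
  intro seen f t
  induction seen, f, t using searchB.induct size N M with
  | case1 seen t => intro x y dd h; simp [searchB] at h
  | case2 seen c fr t p hp =>
    intro x y dd h
    rw [searchB, hp] at h
    have hpx : p.1 = x ∧ p.2 = y ∧ t + 1 = dd := by
      injection h with h; rw [Prod.mk.injEq, Prod.mk.injEq] at h; tauto
    obtain ⟨hx, hy, hd⟩ := hpx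
    subst hx; subst hy; subst hd
    constructor
    · rw [layersA]
      exact List.mem_append_left _
        (List.mem_map.mpr ⟨p, PySem.List.min?_mem hp, by simp [tagT]⟩)
    · intro e he
      rw [layersA] at he
      rcases List.mem_append.mp he with h1 | h1
      · obtain ⟨q, hq, rfl⟩ := List.mem_map.mp h1
        have hmin := PySem.List.min?_isMin hp q hq
        show keyA (p.1, p.2, t + 1) ≤ keyA (tagT (t + 1) q)
        simp only [keyA, tagT]
        rw [Prod.Lex.toLex_le_toLex]
        exact Or.inr ⟨rfl, hmin⟩
      · have ht := layers_time size N M _ _ _ e h1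
        show keyA (p.1, p.2, t + 1) ≤ keyA e
        simp only [keyA]
        rw [Prod.Lex.toLex_le_toLex]
        exact Or.inl (by simp; omega)
  | case3 seen c fr t hp ih =>
    intro x y dd h
    rw [searchB, hp] at h
    obtain ⟨h1, h2⟩ := ih x y dd h
    have hnil : (layerOf size N M seen (c :: fr)).filter (isEat size M) = [] :=
      (PySem.List.min?_eq_none_iff _ _).mp hp
    have hall := filter_not_of_filter_nil _ _ hnil
    rw [layersA, hnil, hall]
    refine ⟨by simpa using h1, ?_⟩
    intro e he
    exact h2 e (by simpa using he)

theorem bfsA_eq (sx sy size N : Int) (M : List (List Int)) :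
    bfsA sx sy size N M =
      (match nearestFishB sx sy size N M with
       | none => (none, M)
       | some e => (some e, mset0 M e.1 e.2.1)) := by
  have keyA_inj : ∀ a b : Int × Int × Int, keyA a = keyA b → a = b := by
    intro a b h
    obtain ⟨a1, a2, a3⟩ := a; obtain ⟨b1, b2, b3⟩ := b
    simp [keyA, Prod.ext_iff] at h ⊢
    tauto
  unfold bfsA nearestFishB
  dsimp only
  have hres : bfsLoopA size N M
      (vset (List.replicate N.toNat (List.replicate N.toNat false)) sx sy) [(sx, sy, 0)] []
      = layersA size N M [(sx, sy)] [(sx, sy)] 0 := by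
    have hv : vset (List.replicate N.toNat (List.replicate N.toNat false)) sx sy
        = visOf N [(sx, sy)] := by simp [visOf]
    rw [hv]
    have h := loopA_eq_layers size N M [(sx, sy)] [(sx, sy)] 0 []
    simpa [tagT] using h
  cases hB : searchB size N M [(sx, sy)] [(sx, sy)] 0 with
  | none =>
    have h0 : layersA size N M [(sx, sy)] [(sx, sy)] 0 = [] :=
      searchB_none size N M [(sx, sy)] [(sx, sy)] 0 hB
    rw [hres, h0]
  | some e =>
    obtain ⟨x, y, d⟩ := e
    obtain ⟨hmem, hmin⟩ := searchB_some size N M [(sx, sy)] [(sx, sy)] 0 x y d hB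
    rw [hres]
    cases hL : layersA size N M [(sx, sy)] [(sx, sy)] 0 with
    | nil => rw [hL] at hmem; simp at hmem
    | cons a rs =>
      rw [hL] at hmem hmin
      cases hs : PySem.List.sorted (a :: rs) keyA with
      | nil => exact absurd ((PySem.List.sorted_eq_nil_iff _ _ _).mp hs) (by simp)
      | cons e0 s' =>
        have hperm := PySem.List.sorted_perm (a :: rs) keyA false
        rw [hs] at hperm
        have he0mem : e0 ∈ a :: rs := hperm.subset (by simp)
        have h1 : keyA (x, y, d) ≤ keyA e0 := hmin e0 he0mem
        have hxin : (x, y, d) ∈ PySem.List.sorted (a :: rs) keyA :=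
          (PySem.List.sorted_perm (a :: rs) keyA false).mem_iff.mpr hmem
        obtain ⟨q, hq, hqe⟩ := List.mem_iff_getElem.mp hxin
        have h2 : keyA e0 ≤ keyA (x, y, d) := by
          have hmono := PySem.List.key_sorted_getElem_mono (a :: rs) keyA (Nat.zero_le q) hq
          rw [hqe] at hmono
          have h00 : (PySem.List.sorted (a :: rs) keyA)[0]'(by rw [hs]; simp) = e0 := by
            simp [hs]
          rw [h00] at hmono
          exact hmono
        have he : e0 = (x, y, d) := keyA_inj _ _ (le_antisymm h2 h1)
        simp [he]

theorem loop_eq (N : Int) :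
    ∀ (fuel : Nat) (x y size eaten acc : Int) (M : List (List Int)),
      loopA fuel x y size eaten acc N M = loopB fuel x y size (size - eaten) acc N M := by
  intro fuel
  induction fuel with
  | zero => intro _ _ _ _ _ _; rfl
  | succ f ih =>
    intro x y size eaten acc M
    simp only [loopA, loopB, bfsA_eq]
    cases h : nearestFishB x y size N M with
    | none => rfl
    | some e =>
      obtain ⟨nx, ny, t⟩ := e
      by_cases he : eaten + 1 = size
      · have hz : size - eaten - 1 = 0 := by omega
        simp only [he, if_true, hz]
        have := ih nx ny (size + 1) 0 (acc + t) (mset0 M nx ny)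
        simpa using this
      · have hz : ¬ (size - eaten - 1 = 0) := by omega
        simp only [he, if_false, hz]
        have := ih nx ny size (eaten + 1) (acc + t) (mset0 M nx ny)
        have harg : size - (eaten + 1) = size - eaten - 1 := by ring
        rw [harg] at this
        simp [this]

-- ===== VERDICT (by name: the statement is the Claim_ definition above) =====
theorem DinnerTime_spec : Claim_equal_DinnerTime := by
  intro N Matrix _ _
  unfold Spec_DinnerTime DinnerTime DinnerTime_alt
  cases h : initShark N Matrix with
  | mk o M' =>
    cases o with
    | none => rfl
    | some p =>
      obtain ⟨i, j⟩ := p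
      have := loop_eq N (fuelOf Matrix) i j 2 0 0 M'
      simpa using this
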